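-- pv_equiv track=rewrite | github.com/irtimir/algorithms | sprint_3/l.py | find_two_idxs
-- ===== SOURCE A (Python) =====
-- def find_idx(incomes, amount, left, right):
--     left_value = incomes[left]
--
--     if left_value >= amount:
--         return left + 1
--
--     right_value = incomes[right - 1]
--
--     if right_value < amount:
--         return -1
--
--     mid = (left + right) // 2
--
--     mid_left_value = incomes[mid - 1]
--
--     if mid_left_value >= amount:
--         return find_idx(incomes, amount, left, mid)
--     else:
--         return find_idx(incomes, amount, mid, right)
--
-- def find_two_idxs(incomes, amount, amount_2, left, right):
--     right_value = incomes[right - 1]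
--
--     if right_value < amount:
--         return -1, -1
--
--     if right_value < amount_2:
--         return find_idx(incomes, amount, left, right), -1
--
--     if incomes[left] >= amount_2:
--         return left + 1, left + 1
--
--     mid = (left + right) // 2
--     mid_left_value = incomes[mid - 1]
--
--     if mid_left_value >= amount:
--         amount_left = left
--         amount_right = mid
--     else:
--         amount_left = mid
--         amount_right = right
--
--     if mid_left_value >= amount_2:
--         amount_2_left = left
--         amount_2_right = mid
--     else:
--         amount_2_left = mid
--         amount_2_right = right
--
--     if (amount_left == amount_2_left) and (amount_right == amount_2_right):
--         return find_two_idxs(incomes, amount, amount_2, amount_left, amount_right)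
--     else:
--         return (
--             find_idx(incomes, amount, amount_left, amount_right),
--             find_idx(incomes, amount_2, amount_2_left, amount_2_right),
--         )
-- ===== SOURCE B (Python) =====
-- def find_idx(incomes, amount, left, right):
--     while True:
--         if incomes[left] >= amount:
--             return left + 1
--         if incomes[right - 1] < amount:
--             return -1
--         mid = (left + right) // 2
--         if incomes[mid - 1] >= amount:
--             right = mid
--         else:
--             left = mid
--
--
-- def find_two_idxs(incomes, amount, amount_2, left, right):
--     while True:
--         right_value = incomes[right - 1]
--         if right_value < amount:
--             return -1, -1
--         if right_value < amount_2:
--             return find_idx(incomes, amount, left, right), -1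
--         if incomes[left] >= amount_2:
--             return left + 1, left + 1
--         mid = (left + right) // 2
--         mid_left_value = incomes[mid - 1]
--         c1 = mid_left_value >= amount
--         c2 = mid_left_value >= amount_2
--         if c1 == c2:
--             # both windows narrow to the same half: keep looping
--             left, right = (left, mid) if c1 else (mid, right)
--         else:
--             return (
--                 find_idx(incomes, amount, *((left, mid) if c1 else (mid, right))),
--                 find_idx(incomes, amount_2, *((left, mid) if c2 else (mid, right))),
--             )
-- ===== Notes on version B (the rewrite author's own statement) =====
-- stated objective: alternative
-- what changed: Both helpers are rewritten as iterative while-loops over an explicit [left,right) window (an explicit step function driven by a loop) instead of A's recursion; the window-coincidence test becomes a comparison of the two branch conditions instead of the two window tuples.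
-- outside the precondition, e.g. on find_two_idxs([1, 5], 2, 9, -2, 2): A returns (0, -1), B returns (0, -1)
import Mathlib
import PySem

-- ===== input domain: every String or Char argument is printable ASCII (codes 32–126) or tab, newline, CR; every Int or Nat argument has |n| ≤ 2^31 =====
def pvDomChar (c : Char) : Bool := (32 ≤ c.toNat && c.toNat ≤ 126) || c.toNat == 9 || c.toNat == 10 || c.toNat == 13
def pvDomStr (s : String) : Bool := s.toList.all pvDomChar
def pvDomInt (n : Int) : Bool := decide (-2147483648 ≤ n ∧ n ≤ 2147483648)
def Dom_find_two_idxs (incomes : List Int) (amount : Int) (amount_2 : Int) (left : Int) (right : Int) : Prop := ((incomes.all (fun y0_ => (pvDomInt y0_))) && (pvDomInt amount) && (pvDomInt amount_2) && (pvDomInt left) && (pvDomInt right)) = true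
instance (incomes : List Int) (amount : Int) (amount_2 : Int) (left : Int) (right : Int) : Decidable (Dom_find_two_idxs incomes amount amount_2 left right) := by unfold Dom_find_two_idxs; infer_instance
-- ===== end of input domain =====

-- B replaces A's recursive binary searches by iterative while-loops over an explicit [left,right) window (step function + loop driver); same comparisons, same cost, return value only.


-- incomes[i]; under Pre_ every access is in range, so the default is never used
def pvGetI (xs : List Int) (i : Int) : Int := (PySem.List.pyGet? xs i).getD 0

-- ===== PORT A =====
-- A's recursive find_idx; fuel (window width + 1, recomputed at each fresh call) only ensures
-- structural termination — under Pre_ it is never exhausted (depth ≤ width).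
def find_idx_A (incomes : List Int) (amount : Int) : Nat → Int → Int → Int
  | 0, _, _ => -1
  | fuel + 1, left, right =>
    let left_value := pvGetI incomes left
    if left_value ≥ amount then left + 1
    else
      let right_value := pvGetI incomes (right - 1)
      if right_value < amount then -1
      else
        let mid := PySem.Int.floordiv (left + right) 2
        let mid_left_value := pvGetI incomes (mid - 1)
        if mid_left_value ≥ amount then find_idx_A incomes amount fuel left mid
        else find_idx_A incomes amount fuel mid right

def find_two_idxs_goA (incomes : List Int) (amount : Int) (amount_2 : Int) : Nat → Int → Int → Int × Int
  | 0, _, _ => (-1, -1)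
  | fuel + 1, left, right =>
    let right_value := pvGetI incomes (right - 1)
    if right_value < amount then (-1, -1)
    else if right_value < amount_2 then
      (find_idx_A incomes amount ((right - left).toNat + 1) left right, -1)
    else if pvGetI incomes left ≥ amount_2 then (left + 1, left + 1)
    else
      let mid := PySem.Int.floordiv (left + right) 2
      let mid_left_value := pvGetI incomes (mid - 1)
      let aw := if mid_left_value ≥ amount then (left, mid) else (mid, right)
      let a2w := if mid_left_value ≥ amount_2 then (left, mid) else (mid, right)
      if aw = a2w then find_two_idxs_goA incomes amount amount_2 fuel aw.1 aw.2
      else (find_idx_A incomes amount ((aw.2 - aw.1).toNat + 1) aw.1 aw.2,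
            find_idx_A incomes amount_2 ((a2w.2 - a2w.1).toNat + 1) a2w.1 a2w.2)

def find_two_idxs (incomes : List Int) (amount : Int) (amount_2 : Int) (left : Int) (right : Int) : Int × Int :=
  find_two_idxs_goA incomes amount amount_2 ((right - left).toNat + 1) left right

-- ===== PORT B =====
-- one iteration of B's find_idx while-loop: inl = return, inr = updated (left, right)
def find_idx_step (incomes : List Int) (amount : Int) (s : Int × Int) : Sum Int (Int × Int) :=
  if pvGetI incomes s.1 ≥ amount then .inl (s.1 + 1)
  else if pvGetI incomes (s.2 - 1) < amount then .inl (-1)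
  else
    let mid := PySem.Int.floordiv (s.1 + s.2) 2
    if pvGetI incomes (mid - 1) ≥ amount then .inr (s.1, mid) else .inr (mid, s.2)

def find_idx_loop (incomes : List Int) (amount : Int) : Nat → Int × Int → Int
  | 0, _ => -1
  | fuel + 1, s =>
    match find_idx_step incomes amount s with
    | .inl out => out
    | .inr s' => find_idx_loop incomes amount fuel s'

def find_idx_B (incomes : List Int) (amount : Int) (left : Int) (right : Int) : Int :=
  find_idx_loop incomes amount ((right - left).toNat + 1) (left, right)

-- one iteration of B's find_two_idxs while-loop
def find_two_step (incomes : List Int) (amount : Int) (amount_2 : Int) (s : Int × Int) : Sum (Int × Int) (Int × Int) :=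
  let rv := pvGetI incomes (s.2 - 1)
  if rv < amount then .inl (-1, -1)
  else if rv < amount_2 then .inl (find_idx_B incomes amount s.1 s.2, -1)
  else if pvGetI incomes s.1 ≥ amount_2 then .inl (s.1 + 1, s.1 + 1)
  else
    let mid := PySem.Int.floordiv (s.1 + s.2) 2
    let mlv := pvGetI incomes (mid - 1)
    let c1 : Bool := decide (mlv ≥ amount)
    let c2 : Bool := decide (mlv ≥ amount_2)
    if c1 = c2 then .inr (if c1 then (s.1, mid) else (mid, s.2))
    else .inl (find_idx_B incomes amount (if c1 then s.1 else mid) (if c1 then mid else s.2),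
               find_idx_B incomes amount_2 (if c2 then s.1 else mid) (if c2 then mid else s.2))

def find_two_loop (incomes : List Int) (amount : Int) (amount_2 : Int) : Nat → Int × Int → Int × Int
  | 0, _ => (-1, -1)
  | fuel + 1, s =>
    match find_two_step incomes amount amount_2 s with
    | .inl out => out
    | .inr s' => find_two_loop incomes amount amount_2 fuel s'

def find_two_idxs_alt (incomes : List Int) (amount : Int) (amount_2 : Int) (left : Int) (right : Int) : Int × Int :=
  find_two_loop incomes amount amount_2 ((right - left).toNat + 1) (left, right)

-- ===== PRECONDITION & SPEC =====
-- the natural call domain — a nonempty window inside the list — plus the two degenerate-window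
-- regions where A's leading guards return before any recursion (incomes[right-1] < amount, or
-- both thresholds at most incomes[right-1] with incomes[left] ≥ amount_2, or amount ≤
-- incomes[right-1] < amount_2 with incomes[left] ≥ amount; indices taken with Python's wraparound).  Excluded are the remaining degenerate windows (left ≥ right or indices
-- outside the list reaching the recursion), where A in general raises IndexError or recurses
-- without bound and any returned value is an accident of negative-index wraparound.
def Pre_find_two_idxs (incomes : List Int) (amount : Int) (amount_2 : Int) (left : Int) (right : Int) : Prop :=
  (0 ≤ left ∧ left < right ∧ right ≤ incomes.length)
  ∨ (PySem.Raise.InRange incomes.length (right - 1) ∧ pvGetI incomes (right - 1) < amount)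
  ∨ (PySem.Raise.InRange incomes.length (right - 1) ∧ PySem.Raise.InRange incomes.length left
      ∧ amount ≤ pvGetI incomes (right - 1) ∧ amount_2 ≤ pvGetI incomes (right - 1)
      ∧ amount_2 ≤ pvGetI incomes left)
  ∨ (PySem.Raise.InRange incomes.length (right - 1) ∧ PySem.Raise.InRange incomes.length left
      ∧ amount ≤ pvGetI incomes (right - 1) ∧ pvGetI incomes (right - 1) < amount_2
      ∧ amount ≤ pvGetI incomes left)
instance (incomes : List Int) (amount : Int) (amount_2 : Int) (left : Int) (right : Int) : Decidable (Pre_find_two_idxs incomes amount amount_2 left right) := by unfold Pre_find_two_idxs; infer_instance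

def pvWitness_find_two_idxs : List Int × Int × Int × Int × Int := ([1, 2, 3], 2, 3, 0, 3)

def Spec_find_two_idxs (incomes : List Int) (amount : Int) (amount_2 : Int) (left : Int) (right : Int) (out : Int × Int) : Prop := out = find_two_idxs_alt incomes amount amount_2 left right
instance (incomes : List Int) (amount : Int) (amount_2 : Int) (left : Int) (right : Int) (out : Int × Int) : Decidable (Spec_find_two_idxs incomes amount amount_2 left right out) := by unfold Spec_find_two_idxs; infer_instance

-- ===== CLAIM (what is proved, stated in full; the proofs are below) =====
def Claim_equal_find_two_idxs : Prop := ∀ (incomes : List Int) (amount : Int) (amount_2 : Int) (left : Int) (right : Int), Dom_find_two_idxs incomes amount amount_2 left right → Pre_find_two_idxs incomes amount amount_2 left right → Spec_find_two_idxs incomes amount amount_2 left right (find_two_idxs incomes amount amount_2 left right)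

-- ===== LEMMAS AND PROOFS =====

-- A's recursive find_idx and B's find_idx loop agree at equal fuel (same comparisons, same updates)
theorem find_idx_eq (incomes : List Int) (amount : Int) :
    ∀ (fuel : Nat) (l r : Int),
      find_idx_A incomes amount fuel l r = find_idx_loop incomes amount fuel (l, r) := by
  intro fuel
  induction fuel with
  | zero => intro l r; rfl
  | succ n ih =>
    intro l r
    simp only [find_idx_A, find_idx_loop, find_idx_step]
    split_ifs <;> simp [ih]

-- midpoint bounds for a window of width ≥ 2
theorem mid_bounds (l r : Int) (h : l + 2 ≤ r) :
    l + 1 ≤ PySem.Int.floordiv (l + r) 2 ∧ PySem.Int.floordiv (l + r) 2 ≤ r - 1 := by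
  rw [PySem.Int.floordiv_eq_ediv_of_pos (by omega : (0:Int) < 2)]
  omega

-- main invariant-carrying induction: on a nonempty in-range window, A's recursion and B's loop agree
theorem find_two_go_eq (incomes : List Int) (amount amount_2 : Int) :
    ∀ (fuel : Nat) (l r : Int), 0 ≤ l → l < r → r ≤ (incomes.length : Int) →
      find_two_idxs_goA incomes amount amount_2 fuel l r
        = find_two_loop incomes amount amount_2 fuel (l, r) := by
  intro fuel
  induction fuel with
  | zero => intro l r _ _ _; rfl
  | succ n ih =>
    intro l r hl hlr hr
    simp only [find_two_idxs_goA, find_two_loop, find_two_step]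
    by_cases h1 : pvGetI incomes (r - 1) < amount
    · simp [h1]
    by_cases h2 : pvGetI incomes (r - 1) < amount_2
    · simp [h1, h2, find_idx_B, find_idx_eq]
    by_cases h3 : pvGetI incomes l ≥ amount_2
    · simp [h1, h2, h3]
    -- past the three guards the window has width ≥ 2: with r = l + 1 the guards contradict
    have hw : l + 2 ≤ r := by
      by_contra hc
      have : r = l + 1 := by omega
      subst this
      simp only [add_sub_cancel_right] at h1 h2
      omega
    obtain ⟨hm1, hm2⟩ := mid_bounds l r hw
    set mid := PySem.Int.floordiv (l + r) 2 with hmid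
    by_cases c1 : pvGetI incomes (mid - 1) ≥ amount <;>
      by_cases c2 : pvGetI incomes (mid - 1) ≥ amount_2
    · -- both narrow to (l, mid): loop on
      simp [h1, h2, h3, c1, c2]
      exact ih l mid hl (by omega) (by omega)
    · -- windows diverge: (l, mid) vs (mid, r); tuples differ since l < mid
      have hne : ((l, mid) : Int × Int) ≠ (mid, r) := by
        intro h; injection h with ha hb; omega
      simp [h1, h2, h3, c1, c2, hne, find_idx_B, find_idx_eq]
    · -- windows diverge: (mid, r) vs (l, mid)
      have hne : ((mid, r) : Int × Int) ≠ (l, mid) := by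
        intro h; injection h with ha hb; omega
      simp [h1, h2, h3, c1, c2, hne, find_idx_B, find_idx_eq]
    · -- both narrow to (mid, r): loop on
      simp [h1, h2, h3, c1, c2]
      exact ih mid r (by omega) (by omega) hr

-- ===== VERDICT (by name: the statement is the Claim_ definition above) =====
theorem find_two_idxs_spec : Claim_equal_find_two_idxs := by
  intro incomes amount amount_2 left right _ hpre
  unfold Spec_find_two_idxs find_two_idxs find_two_idxs_alt
  rcases hpre with ⟨h1, h2, h3⟩ | ⟨-, hlt⟩ | ⟨-, -, hge1, hge2, hge3⟩ | ⟨-, -, hge1, hlt2, hgeL⟩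
  · exact find_two_go_eq incomes amount amount_2 _ left right h1 h2 (by exact_mod_cast h3)
  · -- first guard returns (-1, -1) on both sides
    simp [find_two_idxs_goA, find_two_loop, find_two_step, hlt]
  · -- third guard returns (left + 1, left + 1) on both sides
    have h1 : ¬ pvGetI incomes (right - 1) < amount := not_lt.2 hge1
    have h2 : ¬ pvGetI incomes (right - 1) < amount_2 := not_lt.2 hge2
    simp [find_two_idxs_goA, find_two_loop, find_two_step, h1, h2, hge3]
  · -- second guard: find_idx returns left + 1 at once on both sides
    have h1 : ¬ pvGetI incomes (right - 1) < amount := not_lt.2 hge1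
    simp [find_two_idxs_goA, find_two_loop, find_two_step, h1, hlt2,
          find_idx_A, find_idx_B, find_idx_loop, find_idx_step, hgeL]
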